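-- pv_equiv track=rewrite | github.com/merstad/inf200-advanced-programming | exercises/week_40/lists_to_records.py | to_records_loop_compact
-- ===== SOURCE A (Python) =====
-- def to_records_loop_compact(data):
--     """
--     Implementation using explicit loop but more compact than above.
--     """
--
--     if not data:
--         return []
--
--     # Get all list lengths and compare them to first list length
--     num_records_all = [len(vals) for vals in data.values()]
--     assert all(nr == num_records_all[0] for nr in num_records_all), "Lists must have same length"
--     num_records = num_records_all[0]
--
--     # Build list, using dictionary comprehension to build individual records
--     records = []
--     for record_number in range(num_records):
--         record = {key: data[key][record_number] for key in data.keys()}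
--         records.append(record)
--
--     return records
-- ===== SOURCE B (Python) =====
-- def to_records_loop_compact(data):
--     """Build the records column by column: pre-allocate empty records, then
--     each column pass extends every partial record with its (key, value)."""
--     if not data:
--         return []
--     lengths = [len(vals) for vals in data.values()]
--     assert all(nr == lengths[0] for nr in lengths), "Lists must have same length"
--     records = [{} for _ in range(lengths[0])]
--     for key, vals in data.items():
--         for rec, val in zip(records, vals):
--             rec[key] = val
--     return records
-- ===== Notes on version B (the rewrite author's own statement) =====
-- stated objective: alternative
-- what changed: Column-major accumulation: pre-allocates empty records and fills them one column pass at a time (state = list of partial records), instead of A's row-major construction that builds each record by indexed lookups over range(num_records).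
import Mathlib
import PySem

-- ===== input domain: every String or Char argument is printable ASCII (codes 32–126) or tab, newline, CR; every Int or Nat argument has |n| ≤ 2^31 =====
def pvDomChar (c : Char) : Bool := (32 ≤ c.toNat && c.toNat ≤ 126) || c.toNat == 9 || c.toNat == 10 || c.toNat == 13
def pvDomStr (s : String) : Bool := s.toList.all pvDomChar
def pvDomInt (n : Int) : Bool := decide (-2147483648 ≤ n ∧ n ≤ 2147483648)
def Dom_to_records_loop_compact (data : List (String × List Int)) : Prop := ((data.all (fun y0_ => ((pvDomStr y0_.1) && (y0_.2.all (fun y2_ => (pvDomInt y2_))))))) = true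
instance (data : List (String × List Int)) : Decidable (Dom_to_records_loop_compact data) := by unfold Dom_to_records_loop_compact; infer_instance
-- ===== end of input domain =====

-- B builds the records column by column (pre-allocated partial records extended one column pass
-- at a time) instead of A's row-major indexed construction; alternative decomposition, same cost.

-- ===== PORT A =====
-- A: guard empty dict; list of lengths; assert all equal (Pre_ excludes the raise);
-- then for record_number in range(num_records) append {key: data[key][record_number]}.
def to_records_loop_compact (data : List (String × List Int)) : List (List (String × Int)) :=
  if data = [] then []
  else
    (PySem.List.pyRange 0 (PySem.List.pyGetD (data.map (fun vals => (vals.2.length : Int))) 0 0) 1).foldl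
      (fun records i =>
        records ++ [(data.map Prod.fst).map (fun key =>
          (key, PySem.List.pyGetD (((PySem.Dict.mk data).get? key).getD []) i 0))]) []

-- ===== PORT B =====
-- records = [{} for _ in range(lengths[0])]; for key, vals in data.items():
--   for rec, val in zip(records, vals): rec[key] = val; return records (dicts as item lists)
def to_records_loop_compact_alt (data : List (String × List Int)) : List (List (String × Int)) :=
  if data = [] then []
  else
    (data.foldl
      (fun records kv => (records.zip kv.2).map (fun rv => rv.1.insert kv.1 rv.2))
      (List.replicate ((data.map (fun vals => vals.2.length)).headD 0) PySem.Dict.empty)).map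
      PySem.Dict.items

-- ===== PRECONDITION & SPEC =====
-- Pre_ excludes (i) columns of unequal length, on which A raises AssertionError, and
-- (ii) duplicate keys, which cannot occur in the Python dict input this assoc list represents.
def Pre_to_records_loop_compact (data : List (String × List Int)) : Prop :=
  (data.map Prod.fst).Nodup ∧ ∀ kv ∈ data, kv.2.length = (data.headD ("", [])).2.length
instance (data : List (String × List Int)) : Decidable (Pre_to_records_loop_compact data) := by
  unfold Pre_to_records_loop_compact; infer_instance
def pvWitness_to_records_loop_compact : (List (String × List Int)) :=
  [("a", [1, 2]), ("b", [3, 4])]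

def Spec_to_records_loop_compact (data : List (String × List Int)) (out : List (List (String × Int))) : Prop := out = to_records_loop_compact_alt data
instance (data : List (String × List Int)) (out : List (List (String × Int))) : Decidable (Spec_to_records_loop_compact data out) := by unfold Spec_to_records_loop_compact; infer_instance

-- ===== CLAIM (what is proved, stated in full; the proofs are below) =====
def Claim_equal_to_records_loop_compact : Prop := ∀ (data : List (String × List Int)), Dom_to_records_loop_compact data → Pre_to_records_loop_compact data → Spec_to_records_loop_compact data (to_records_loop_compact data)

-- ===== LEMMAS AND PROOFS =====

-- B's outer fold over the columns, read off per row: record i is the inner fold of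
-- inserting (key, column[i]) over the columns, started from the initial record i.
theorem fold_cols_eq_rows (cols : List (String × List Int))
    (recs : List (PySem.Dict String Int))
    (hlen : ∀ c ∈ cols, c.2.length = recs.length) :
    cols.foldl (fun records kv => (records.zip kv.2).map (fun rv => rv.1.insert kv.1 rv.2)) recs
      = (List.range recs.length).map (fun i =>
          cols.foldl (fun d kv => d.insert kv.1 (kv.2.getD i 0)) (recs.getD i PySem.Dict.empty)) := by
  induction cols generalizing recs with
  | nil =>
    simp only [List.foldl_nil]
    refine (List.ext_getElem (by simp) ?_).symm
    intro i h1 h2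
    simp [List.getElem?_eq_getElem h2]
  | cons kv cols ih =>
    simp only [List.foldl_cons]
    have hkv : kv.2.length = recs.length := hlen kv (by simp)
    have hrl : ((recs.zip kv.2).map (fun rv => rv.1.insert kv.1 rv.2)).length = recs.length := by
      simp [hkv]
    rw [ih _ (by intro c hc; rw [hrl]; exact hlen c (by simp [hc]))]
    rw [hrl]
    refine List.map_congr_left fun i hi => ?_
    have hi' : i < recs.length := List.mem_range.mp hi
    congr 1
    rw [List.getD_eq_getElem _ _ (by simpa [hkv] using hi'),
        List.getD_eq_getElem _ _ hi',
        List.getD_eq_getElem _ _ (by omega : i < kv.2.length)]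
    simp

theorem to_records_loop_compact_spec : Claim_equal_to_records_loop_compact := by
  intro data _hdom hpre
  obtain ⟨hnodup, hlen⟩ := hpre
  unfold Spec_to_records_loop_compact to_records_loop_compact to_records_loop_compact_alt
  cases data with
  | nil => simp
  | cons kv0 rest =>
    rw [if_neg (by simp), if_neg (by simp)]
    -- B side: rows by index
    have hlen' : ∀ c ∈ kv0 :: rest, c.2.length =
        (List.replicate ((((kv0 :: rest).map (fun vals => vals.2.length)).headD 0)) (PySem.Dict.empty (κ := String) (ν := Int))).length := by
      intro c hc
      simpa using hlen c hc
    rw [fold_cols_eq_rows _ _ hlen']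
    have hrepl : (List.replicate ((((kv0 :: rest).map (fun vals => vals.2.length)).headD 0)) (PySem.Dict.empty (κ := String) (ν := Int))).length = kv0.2.length := by simp
    rw [hrepl]
    -- A side: pyRange over num_records
    have hnum : PySem.List.pyGetD ((kv0 :: rest).map (fun vals => ((vals.2.length : Int)))) 0 0
        = (kv0.2.length : Int) := by
      simp [PySem.List.pyGetD_zero]
    rw [hnum, PySem.List.pyRange_zero_natCast, PySem.List.foldl_append_singleton_eq_map,
        List.nil_append, List.map_map, List.map_map]
    refine List.map_congr_left fun i hi => ?_
    have hi' : i < kv0.2.length := List.mem_range.mp hi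
    simp only [Function.comp]
    -- record i: A's dict-comprehension row = items of B's inner insert fold
    have hfresh : ∀ a ∈ kv0 :: rest,
        (PySem.Dict.empty (κ := String) (ν := Int)).contains a.1 = false := by
      intro a _; simp
    have hrec0 : (List.replicate (((kv0 :: rest).map (fun vals => vals.2.length)).headD 0)
        (PySem.Dict.empty (κ := String) (ν := Int))).getD i PySem.Dict.empty = PySem.Dict.empty := by
      rcases Nat.lt_or_ge i (((kv0 :: rest).map (fun vals => vals.2.length)).headD 0) with h | h
      · exact (List.getD_eq_getElem _ _ (by simpa using h)).trans (List.getElem_replicate _)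
      · exact List.getD_eq_default _ _ (by simpa using h)
    rw [hrec0]
    rw [PySem.Dict.items_foldl_insert_fresh (kv0 :: rest) Prod.fst
        (fun kv => kv.2.getD i 0) PySem.Dict.empty hfresh hnodup]
    simp only [show (PySem.Dict.empty (κ := String) (ν := Int)).items = [] from rfl,
      List.nil_append]
    rw [List.map_map]
    refine List.map_congr_left fun kv hkv => ?_
    simp only [Function.comp]
    have hget : (PySem.Dict.mk (kv0 :: rest)).get? kv.1 = some kv.2 :=
      PySem.Dict.get?_of_mem_items (PySem.Dict.mk (kv0 :: rest))
        (by simpa using hkv) (by simpa using hnodup)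
    rw [hget]
    have hkvlen : kv.2.length = kv0.2.length := by simpa using hlen kv hkv
    rw [PySem.List.pyGetD_natCast]
    simp
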